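-- pv_equiv track=rewrite | github.com/dkrupali56/Devsnest-DSA | Deck of Cards.py | solve
-- ===== SOURCE A (Python) =====
-- from math import gcd
-- from functools import reduce
--
-- def gcd(a,b):
--
--     if b==0:
--         return a
--
--     return gcd(b,a%b)
--
-- def solve(n, deck):
--
--     hashmap={}
--
--     for i in deck:
--
--         if i in hashmap:
--             hashmap[i]+=1
--
--         else:
--             hashmap[i]=1
--     x=reduce(gcd,hashmap.values())
--     if x==1:
--         return 0
--
--     return 1
-- ===== SOURCE B (Python) =====
-- def solve(n, deck):
--     # Gcd-free algorithm: the counts have a common factor > 1 iff some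
--     # d in 2..min(counts) divides every count (any common divisor is at
--     # most the minimum, and the gcd itself is such a d).  So search for
--     # one by trial division instead of folding a gcd.
--     vals = [deck.count(x) for x in set(deck)]
--     m = min(vals)  # ValueError on the empty deck (A raises TypeError there)
--     for d in range(2, m + 1):
--         if all(v % d == 0 for v in vals):
--             return 1
--     return 0
-- ===== Notes on version B (the rewrite author's own statement) =====
-- stated objective: alternative
-- what changed: B computes no gcd at all: it lists the count of each distinct card value and searches by trial division for a common divisor d in 2..min(counts), returning 1 iff one exists (correct because any common divisor is <= the minimum count and the gcd itself is such a d).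
import Mathlib
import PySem

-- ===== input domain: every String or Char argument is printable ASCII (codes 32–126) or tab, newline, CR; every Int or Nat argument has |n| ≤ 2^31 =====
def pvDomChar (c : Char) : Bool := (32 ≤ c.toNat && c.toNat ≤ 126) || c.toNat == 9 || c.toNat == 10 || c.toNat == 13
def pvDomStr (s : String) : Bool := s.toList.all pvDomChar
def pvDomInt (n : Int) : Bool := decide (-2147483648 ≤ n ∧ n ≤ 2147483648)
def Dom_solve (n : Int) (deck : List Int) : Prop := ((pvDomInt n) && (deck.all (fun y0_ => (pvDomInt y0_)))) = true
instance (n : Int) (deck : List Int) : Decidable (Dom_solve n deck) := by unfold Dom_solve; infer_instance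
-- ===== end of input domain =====

-- B computes no gcd at all: it lists the count of each distinct card value and searches
-- by trial division for a common divisor d in 2..min(counts) (objective: alternative).

-- ===== PORT A =====
-- termination fact for the recursive Python gcd (cited by decreasing_by below)
theorem pygcd_mod_lt (a b : Int) (hb : ¬ b = 0) :
    (PySem.Int.mod a b).natAbs < b.natAbs := by
  rcases lt_trichotomy b 0 with h | h | h
  · have := PySem.Int.mod_neg_bounds a h
    omega
  · exact absurd h hb
  · have h1 := PySem.Int.mod_nonneg a h
    have h2 := PySem.Int.mod_lt a h
    omega

-- Python: def gcd(a,b): if b==0: return a ; return gcd(b, a%b)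
def pygcd (a b : Int) : Int :=
  if b = 0 then a else pygcd b (PySem.Int.mod a b)
termination_by b.natAbs
decreasing_by exact pygcd_mod_lt a b (by assumption)

def solve (n : Int) (deck : List Int) : Int :=
  let hashmap : PySem.Dict Int Int :=
    deck.foldl (fun d i =>
      if d.contains i then d.insert i (d.getD i 0 + 1) else d.insert i 1)
      PySem.Dict.empty
  match hashmap.values with
  | [] => 0          -- unreachable under Pre_solve: reduce raises TypeError on an empty sequence
  | c :: cs =>
      let x := cs.foldl pygcd c
      if x = 1 then 0 else 1

-- ===== PORT B =====
def solve_alt (n : Int) (deck : List Int) : Int :=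
  let vals : List Int := (PySem.Set.ofList deck).map (fun x => ((deck.count x : Nat) : Int))
  match PySem.List.min? vals (fun v => v) with
  | none => 0        -- unreachable under Pre_solve: min([]) raises ValueError
  | some m =>
      if (PySem.List.pyRange 2 (m + 1) 1).any
          (fun d => vals.all (fun v => PySem.Int.mod v d == 0)) then 1 else 0

-- ===== PRECONDITION & SPEC =====
-- Pre_solve excludes only the empty deck, on which A's reduce raises TypeError (B's min raises ValueError).
def Pre_solve (n : Int) (deck : List Int) : Prop := deck ≠ []
instance (n : Int) (deck : List Int) : Decidable (Pre_solve n deck) := by unfold Pre_solve; infer_instance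
def pvWitness_solve : Int × List Int := (4, [1, 2, 1, 2])

def Spec_solve (n : Int) (deck : List Int) (out : Int) : Prop := out = solve_alt n deck
instance (n : Int) (deck : List Int) (out : Int) : Decidable (Spec_solve n deck out) := by unfold Spec_solve; infer_instance

-- ===== CLAIM =====
def Claim_equal_solve : Prop := ∀ (n : Int) (deck : List Int), Dom_solve n deck → Pre_solve n deck → Spec_solve n deck (solve n deck)

-- ===== LEMMAS AND PROOFS =====

-- Python's recursive gcd agrees with Int.gcd on nonnegative inputs
theorem int_gcd_rec (a b : Int) (ha : 0 ≤ a) (hb : b ≠ 0) :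
    Int.gcd b (a % b) = Int.gcd a b := by
  unfold Int.gcd
  rw [Int.natAbs_emod a hb, if_pos (Or.inl ha)]
  rw [Nat.gcd_comm b.natAbs, ← Nat.gcd_rec, Nat.gcd_comm]

theorem pygcd_eq_gcd_aux (k : Nat) : ∀ (a b : Int), b.natAbs ≤ k → 0 ≤ a → 0 ≤ b →
    pygcd a b = (Int.gcd a b : Int) := by
  induction k with
  | zero =>
      intro a b hk ha hb
      have hb0 : b = 0 := by omega
      rw [pygcd, if_pos hb0, hb0]
      simp [Int.gcd, Int.natAbs_of_nonneg ha]
  | succ k ih =>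
      intro a b hk ha hb
      by_cases hb0 : b = 0
      · rw [pygcd, if_pos hb0, hb0]
        simp [Int.gcd, Int.natAbs_of_nonneg ha]
      · have hbpos : 0 < b := lt_of_le_of_ne hb (Ne.symm hb0)
        rw [pygcd, if_neg hb0]
        have hm : PySem.Int.mod a b = a % b := PySem.Int.mod_eq_emod_of_pos (a := a) hbpos
        have hlt := pygcd_mod_lt a b hb0
        have h1 : 0 ≤ PySem.Int.mod a b := PySem.Int.mod_nonneg a hbpos
        rw [ih b (PySem.Int.mod a b) (by omega) hb h1, hm, int_gcd_rec a b ha hb0]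

theorem pygcd_eq_gcd (a b : Int) (ha : 0 ≤ a) (hb : 0 ≤ b) :
    pygcd a b = (Int.gcd a b : Int) :=
  pygcd_eq_gcd_aux b.natAbs a b le_rfl ha hb

-- the gcd fold keeps the accumulator positive
theorem foldl_gcd_pos (cs : List Int) : ∀ (a : Int), 0 < a →
    0 < cs.foldl (fun g v => (Int.gcd g v : Int)) a := by
  induction cs with
  | nil => intro a ha; simpa using ha
  | cons c cs ih =>
      intro a ha
      simp only [List.foldl_cons]
      exact ih _ (by exact_mod_cast Int.gcd_pos_iff.mpr (Or.inl (by omega)))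

-- pygcd fold = Int.gcd fold on nonnegative data
theorem foldl_pygcd_eq (cs : List Int) : ∀ (a : Int), 0 ≤ a → (∀ c ∈ cs, 0 ≤ c) →
    cs.foldl pygcd a = cs.foldl (fun g v => (Int.gcd g v : Int)) a := by
  induction cs with
  | nil => intro a _ _; rfl
  | cons c cs ih =>
      intro a ha h
      simp only [List.foldl_cons]
      rw [pygcd_eq_gcd a c ha (h c (by simp))]
      exact ih _ (by positivity) (fun c hc => h c (by simp [hc]))

-- the gcd fold divides the seed and every element
theorem foldl_gcd_dvd (cs : List Int) : ∀ (a : Int),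
    (cs.foldl (fun g v => (Int.gcd g v : Int)) a ∣ a) ∧
    (∀ v ∈ cs, cs.foldl (fun g v => (Int.gcd g v : Int)) a ∣ v) := by
  induction cs with
  | nil => intro a; exact ⟨dvd_refl a, by simp⟩
  | cons c cs ih =>
      intro a
      simp only [List.foldl_cons]
      obtain ⟨h1, h2⟩ := ih ((Int.gcd a c : Int))
      refine ⟨h1.trans (Int.gcd_dvd_left a c), ?_⟩
      intro v hv
      rcases List.mem_cons.mp hv with he | hv
      · rw [he]; exact h1.trans (Int.gcd_dvd_right a c)
      · exact h2 v hv

-- every common divisor of the seed and the elements divides the gcd fold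
theorem dvd_foldl_gcd (cs : List Int) : ∀ (a d : Int), d ∣ a → (∀ v ∈ cs, d ∣ v) →
    d ∣ cs.foldl (fun g v => (Int.gcd g v : Int)) a := by
  induction cs with
  | nil => intro a d ha _; simpa using ha
  | cons c cs ih =>
      intro a d ha h
      simp only [List.foldl_cons]
      have hdn : d.natAbs ∣ Nat.gcd a.natAbs c.natAbs :=
        Nat.dvd_gcd (Int.natAbs_dvd_natAbs.mpr ha) (Int.natAbs_dvd_natAbs.mpr (h c (by simp)))
      have hd : d ∣ ((Int.gcd a c : Nat) : Int) :=
        Int.natAbs_dvd.mp (Int.natCast_dvd_natCast.mpr hdn)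
      exact ih _ d hd (fun v hv => h v (by simp [hv]))

-- A's dict values are the counts of the distinct card values, in first-occurrence order
theorem counts_map (deck : List Int) :
    (List.foldl (fun d i =>
        if d.contains i then d.insert i (d.getD i 0 + 1) else d.insert i 1)
        PySem.Dict.empty deck).values
      = (PySem.Set.ofList deck).map (fun k => ((List.count k deck : Nat) : Int)) := by
  have hf : (fun (d : PySem.Dict Int Int) i =>
        if d.contains i then d.insert i (d.getD i 0 + 1) else d.insert i 1)
      = (fun d x => d.insert x (d.getD x 0 + 1)) := by
    funext d i
    by_cases h : d.contains i = true
    · rw [if_pos h]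
    · rw [if_neg (by simp [h]), PySem.Dict.getD_of_not_contains d 0 (by simpa using h)]
      norm_num
  rw [hf, PySem.Dict.foldl_insert_getD_add_one_eq_counter]
  show (PySem.Dict.counter deck).items.map Prod.snd = _
  rw [PySem.Dict.items_counter]
  simp [List.map_map, Function.comp]

-- ===== VERDICT =====
theorem solve_spec : Claim_equal_solve := by
  intro n deck _ hpre
  unfold Spec_solve solve solve_alt
  simp only []
  rw [counts_map deck]
  -- the distinct-value list is nonempty
  cases hs : PySem.Set.ofList deck with
  | nil =>
      exfalso
      cases deck with
      | nil => exact hpre rfl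
      | cons d ds =>
          have : d ∈ PySem.Set.ofList (d :: ds) := (PySem.Set.mem_ofList _ _).mpr (by simp)
          rw [hs] at this; exact absurd this (by simp)
  | cons v vs =>
      set f : Int → Int := fun k => ((List.count k deck : Nat) : Int) with hfdef
      have hposmem : ∀ k ∈ v :: vs, 0 < f k := by
        intro k hk
        have : k ∈ deck := (PySem.Set.mem_ofList deck k).mp (hs ▸ hk)
        have := List.count_pos_iff.mpr this
        simp only [hfdef]; exact_mod_cast this
      -- A's value: the gcd fold G over the counts
      have hv1 : 0 < f v := hposmem v (by simp)
      have hnn : ∀ c ∈ vs.map f, 0 ≤ c := by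
        intro c hc
        obtain ⟨w, hw, rfl⟩ := List.mem_map.mp hc
        exact le_of_lt (hposmem w (by simp [hw]))
      set G := (vs.map f).foldl (fun g v => (Int.gcd g v : Int)) (f v) with hGdef
      have hA : (vs.map f).foldl pygcd (f v) = G := by
        rw [hGdef, foldl_pygcd_eq _ _ (le_of_lt hv1) hnn]
      have hGpos : 0 < G := foldl_gcd_pos _ _ hv1
      have hGdvd : ∀ k ∈ v :: vs, G ∣ f k := by
        intro k hk
        rcases List.mem_cons.mp hk with h | hk
        · rw [h]; exact (foldl_gcd_dvd (vs.map f) (f v)).1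
        · exact (foldl_gcd_dvd (vs.map f) (f v)).2 (f k) (List.mem_map.mpr ⟨k, hk, rfl⟩)
      -- B's value: the min exists
      cases hm : PySem.List.min? ((v :: vs).map f) (fun x => x) with
      | none =>
          exfalso
          have := (PySem.List.min?_eq_none_iff (xs := (v :: vs).map f) (key := fun x => x)).mp hm
          simp at this
      | some m =>
          have hmmem : m ∈ (v :: vs).map f := PySem.List.min?_mem hm
          obtain ⟨km, hkm, hkmv⟩ := List.mem_map.mp hmmem
          have hmpos : 0 < m := hkmv ▸ hposmem km hkm
          have hmin : ∀ y ∈ (v :: vs).map f, m ≤ y := by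
            intro y hy
            exact PySem.List.min?_isMin hm y hy
          simp only [List.map_cons] at *
          -- the divisor search succeeds iff G ≠ 1
          have hiff : ((PySem.List.pyRange 2 (m + 1) 1).any
              (fun d => (f v :: vs.map f).all (fun w => PySem.Int.mod w d == 0)) = true) ↔ G ≠ 1 := by
            constructor
            · rintro h
              obtain ⟨d, hd, hall⟩ := List.any_eq_true.mp h
              have hdr := (PySem.List.mem_pyRange_one).mp hd
              have hdvdall : ∀ w ∈ f v :: vs.map f, d ∣ w := by
                intro w hw
                have := List.all_eq_true.mp hall w hw
                exact (PySem.Int.mod_eq_zero_iff_dvd w d).mp (by simpa using this)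
              have hdG : d ∣ G :=
                dvd_foldl_gcd (vs.map f) (f v) d (hdvdall _ (by simp))
                  (fun w hw => hdvdall w (by simp [hw]))
              have := Int.le_of_dvd hGpos hdG
              omega
            · intro hne
              have hG2 : 2 ≤ G := by omega
              have hGm : G ≤ m := by
                have : G ∣ m := hkmv ▸ hGdvd km hkm
                exact Int.le_of_dvd hmpos this
              refine List.any_eq_true.mpr ⟨G, ?_, ?_⟩
              · exact (PySem.List.mem_pyRange_one).mpr ⟨by omega, by omega⟩
              · refine List.all_eq_true.mpr (fun w hw => ?_)
                have hd : G ∣ w := by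
                  rcases List.mem_cons.mp hw with rfl | hw
                  · exact hGdvd v (by simp)
                  · obtain ⟨k, hk, rfl⟩ := List.mem_map.mp hw
                    exact hGdvd k (by simp [hk])
                simpa using (PySem.Int.mod_eq_zero_iff_dvd w G).mpr hd
          rw [hA]
          by_cases h1 : G = 1
          · rw [if_pos h1]
            have hfalse : ((PySem.List.pyRange 2 (m + 1) 1).any
                (fun d => (f v :: vs.map f).all (fun w => PySem.Int.mod w d == 0))) = false := by
              rw [Bool.eq_false_iff]; intro h; exact (hiff.mp h) h1
            simp only [hfalse, Bool.false_eq_true, if_false]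
          · rw [if_neg h1]
            simp only [hiff.mpr h1, if_true]
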